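-- pv_equiv track=rewrite | github.com/downscore/eam-talon | core/lib/format_util.py | auto_capitalize
-- ===== SOURCE A (Python) =====
-- def auto_capitalize(text: str) -> str:
--   """Auto-capitalize some text based on punctuation and line breaks."""
--   result = ""
--   capitalize_next = False
--   last_was_newline = False
--   for i, c in enumerate(text):
--     # Sentence endings and double newlines cause the next alphanumeric character to be capitalized.
--     if c in ".!?" or (last_was_newline and c == "\n"):
--       if i < len(text) - 1 and c == "." and text[i + 1:].isalpha():  # Check if this looks like a file extension.
--         capitalize_next = False  # Don't capitalize file extensions.
--       else:
--         capitalize_next = True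
--     # Alphanumeric characters and commas/colons absorb capitalize_next and try to capitalize. For numbers and
--     # punctuation this does nothing, which is what we want.
--     elif capitalize_next and (c.isalnum() or c in ",:"):
--       capitalize_next = False
--       c = c.capitalize()
--
--     result += c
--     last_was_newline = c == "\n"
--   return result
-- ===== SOURCE B (Python) =====
-- def auto_capitalize(text: str) -> str:
--   """Auto-capitalize some text based on punctuation and line breaks.
--
--   Three staged passes: (1) a backward scan measures the longest
--   all-alphabetic suffix, so the file-extension test is O(1); (2) a
--   state pass records the capitalize flag active before each character;
--   (3) the output is emitted by zipping characters with their flags.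
--   """
--   n = len(text)
--   # Length of the longest suffix of text consisting only of alphabetic chars.
--   alpha_tail = 0
--   for ch in reversed(text):
--     if not ch.isalpha():
--       break
--     alpha_tail += 1
--   # caps[i] = capitalize flag in force when character i is processed.
--   caps = []
--   cap = False
--   nl = False
--   for i, c in enumerate(text):
--     caps.append(cap)
--     if c in ".!?" or (nl and c == "\n"):
--       # text[i+1:].isalpha()  <=>  0 < n - i - 1 <= alpha_tail
--       cap = not (c == "." and 0 < n - i - 1 <= alpha_tail)
--     elif cap and (c.isalnum() or c in ",:"):
--       cap = False
--     nl = c == "\n"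
--   return "".join(
--     c.upper() if st and (c.isalnum() or c in ",:") else c
--     for c, st in zip(text, caps)
--   )
-- ===== Notes on version B (the rewrite author's own statement) =====
-- stated objective: alternative
-- what changed: Replaced A's single loop with per-period suffix re-scan (text[i+1:].isalpha()) and string concatenation by three staged passes: a backward scan measuring the longest alphabetic suffix (making the file-extension test O(1)), a state pass collecting the capitalize flags, and a zip/join emission.
import Mathlib
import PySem

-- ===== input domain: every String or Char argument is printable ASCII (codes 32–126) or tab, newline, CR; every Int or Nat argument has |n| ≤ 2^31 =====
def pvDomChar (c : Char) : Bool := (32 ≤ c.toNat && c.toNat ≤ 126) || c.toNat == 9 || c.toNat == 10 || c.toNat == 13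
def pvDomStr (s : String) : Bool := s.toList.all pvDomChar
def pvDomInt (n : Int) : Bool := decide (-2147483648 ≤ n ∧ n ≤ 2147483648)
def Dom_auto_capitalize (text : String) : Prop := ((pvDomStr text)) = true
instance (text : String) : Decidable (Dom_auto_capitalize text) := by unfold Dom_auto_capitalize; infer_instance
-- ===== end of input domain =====

-- B replaces A's per-period suffix re-scan and single emitting loop by three staged passes:
-- a backward scan measuring the longest alphabetic suffix, a state pass collecting the
-- capitalize flags, and a zip/map emission (alternative decomposition).

-- ===== PORT A =====
-- A's single forward loop; the suffix 'rest' IS text[i+1:], and 'i < len(text)-1' is 'rest ≠ []'.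
-- c.capitalize() on a one-character ASCII string is upperChar (exact on the printable-ASCII domain).
def pvGoA : List Char → Bool → Bool → List Char
  | [], _, _ => []
  | c :: rest, cap, nl =>
    if c == '.' || c == '!' || c == '?' || (nl && c == '\n') then
      let cap' := if (!rest.isEmpty) && c == '.' && PySem.Chars.strIsalpha rest then false else true
      c :: pvGoA rest cap' (c == '\n')
    else if cap && (PySem.Chars.isalnum c || c == ',' || c == ':') then
      let c' := PySem.Chars.upperChar c
      c' :: pvGoA rest false (c' == '\n')
    else
      c :: pvGoA rest cap (c == '\n')

def auto_capitalize (text : String) : String :=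
  String.ofList (pvGoA text.toList false false)

-- ===== PORT B =====
-- Stage 1: the 'for ch in reversed(text): … break' loop counting the alphabetic suffix,
-- as a recursion over the reversed character list.
def pvAlphaTail : List Char → Nat
  | [] => 0
  | c :: rest => if PySem.Chars.isalpha c then pvAlphaTail rest + 1 else 0

-- Stage 2: the state pass; caps[i] is the capitalize flag before character i.
-- 'n - i - 1' is the Python int n-i-1, which is ≥ 0 whenever i indexes text.
def pvCaps (alphaTail n : Nat) : List Char → Nat → Bool → Bool → List Bool
  | [], _, _, _ => []
  | c :: rest, i, cap, nl =>
    cap ::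
      (if c == '.' || c == '!' || c == '?' || (nl && c == '\n') then
        pvCaps alphaTail n rest (i + 1)
          (!(c == '.' && decide (0 < n - i - 1 ∧ n - i - 1 ≤ alphaTail))) (c == '\n')
      else if cap && (PySem.Chars.isalnum c || c == ',' || c == ':') then
        pvCaps alphaTail n rest (i + 1) false (c == '\n')
      else
        pvCaps alphaTail n rest (i + 1) cap (c == '\n'))

-- Stage 3: the emission in the join'ed generator expression.
def pvEmit (c : Char) (st : Bool) : Char :=
  if st && (PySem.Chars.isalnum c || c == ',' || c == ':') then PySem.Chars.upperChar c else c

def auto_capitalize_alt (text : String) : String :=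
  let cs := text.toList
  let caps := pvCaps (pvAlphaTail cs.reverse) cs.length cs 0 false false
  String.ofList ((cs.zip caps).map (fun p => pvEmit p.1 p.2))

-- ===== PRECONDITION & SPEC =====
def Spec_auto_capitalize (text : String) (out : String) : Prop := out = auto_capitalize_alt text
instance (text : String) (out : String) : Decidable (Spec_auto_capitalize text out) := by unfold Spec_auto_capitalize; infer_instance

-- ===== CLAIM (what is proved, stated in full; the proofs are below) =====
def Claim_equal_auto_capitalize : Prop := ∀ (text : String), Dom_auto_capitalize text → Spec_auto_capitalize text (auto_capitalize text)

-- ===== LEMMAS AND PROOFS =====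

theorem pvAlphaTail_append_of_all (u z : List Char) (h : u.all PySem.Chars.isalpha = true) :
    pvAlphaTail (u ++ z) = u.length + pvAlphaTail z := by
  induction u with
  | nil => simp
  | cons c rest ih =>
    simp only [List.all_cons, Bool.and_eq_true] at h
    simp [pvAlphaTail, h.1, ih h.2]
    omega

theorem pvAlphaTail_append_lt (u z : List Char) (h : u.all PySem.Chars.isalpha = false) :
    pvAlphaTail (u ++ z) < u.length := by
  induction u with
  | nil => simp at h
  | cons c rest ih =>
    simp only [List.all_cons] at h
    by_cases hc : PySem.Chars.isalpha c = true
    · simp [pvAlphaTail, hc]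
      have := ih (by simpa [hc] using h)
      omega
    · simp [pvAlphaTail, hc]

-- A suffix 'rest' of cs is nonempty-and-all-alphabetic iff 0 < |rest| ≤ alphaTail(cs.reverse).
theorem suffix_alpha_iff (pre rest : List Char) :
    ((!rest.isEmpty) && PySem.Chars.strIsalpha rest) =
      decide (0 < rest.length ∧ rest.length ≤ pvAlphaTail ((pre ++ rest).reverse)) := by
  rw [List.reverse_append]
  by_cases hall : rest.all PySem.Chars.isalpha = true
  · have hlen := pvAlphaTail_append_of_all rest.reverse pre.reverse
      (by simpa [List.all_reverse] using hall)
    rw [List.length_reverse] at hlen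
    rw [hlen]
    cases rest with
    | nil => simp
    | cons d ds => simp [PySem.Chars.strIsalpha, hall]
  · have hall' := eq_false_of_ne_true hall
    have hlt := pvAlphaTail_append_lt rest.reverse pre.reverse
      (by simpa [List.all_reverse] using hall')
    rw [List.length_reverse] at hlt
    simp [PySem.Chars.strIsalpha, hall']
    omega

-- The uppercase of an alphanumeric (or ','/':') character is a newline iff the character is.
theorem upper_ne_nl (c : Char) (h : (PySem.Chars.isalnum c || c == ',' || c == ':') = true) :
    (PySem.Chars.upperChar c == '\n') = (c == '\n') := by
  cases hc : (c == '\n') with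
  | true =>
    have : c = '\n' := beq_iff_eq.mp hc
    subst this
    simp_all [PySem.Chars.isalnum, PySem.Chars.isalpha, PySem.Chars.isdigit,
      PySem.Chars.isupper, PySem.Chars.islower]
  | false =>
    unfold PySem.Chars.upperChar
    split_ifs with hl
    · simp only [PySem.Chars.islower, Bool.and_eq_true, decide_eq_true_eq, Char.le_def] at hl
      obtain ⟨h1, h2⟩ := hl
      have h1' : 97 ≤ c.toNat := h1
      have h2' : c.toNat ≤ 122 := h2
      have hv : (c.toNat - 32).isValidChar := Or.inl (by omega)
      have ht : (Char.ofNat (c.toNat - 32)).toNat = c.toNat - 32 := by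
        rw [Char.toNat_ofNat, if_pos hv]
      simp only [beq_eq_false_iff_ne, ne_eq] at hc ⊢
      intro hx
      have htn := congrArg Char.toNat hx
      rw [ht] at htn
      have h10 : ('\n').toNat = 10 := rfl
      rw [h10] at htn
      omega
    · exact hc

-- A's single emitting loop computes the zip/map of B's staged passes (pre = processed prefix).
theorem pvGoA_eq_zip (cs : List Char) :
    ∀ (pre rest : List Char) (cap nl : Bool), cs = pre ++ rest →
    pvGoA rest cap nl =
      (rest.zip (pvCaps (pvAlphaTail cs.reverse) cs.length rest pre.length cap nl)).map
        (fun p => pvEmit p.1 p.2) := by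
  intro pre rest
  induction rest generalizing pre with
  | nil => intro cap nl _; rfl
  | cons c rest ih =>
    intro cap nl hcs
    have hlen : cs.length - pre.length - 1 = rest.length := by
      subst hcs; simp
    have hih := fun cap nl => ih (pre ++ [c]) cap nl (by simp [hcs])
    simp only [List.length_append, List.length_cons, List.length_nil, Nat.zero_add] at hih
    have hsuff : ((!rest.isEmpty) && PySem.Chars.strIsalpha rest) =
        decide (0 < rest.length ∧ rest.length ≤ pvAlphaTail cs.reverse) := by
      have h := suffix_alpha_iff (pre ++ [c]) rest
      rwa [show pre ++ [c] ++ rest = cs by simp [hcs]] at h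
    have hcap : (if ((!rest.isEmpty) && c == '.' && PySem.Chars.strIsalpha rest) = true
          then false else true) =
        (!(c == '.' && decide (0 < rest.length ∧ rest.length ≤ pvAlphaTail cs.reverse))) := by
      rw [← hsuff]
      cases hc : c == '.' <;> cases he : rest.isEmpty <;> cases hs : PySem.Chars.strIsalpha rest <;>
        simp
    simp only [pvGoA, pvCaps, hlen, hcap, List.zip_cons_cons, List.map_cons]
    split_ifs with h1 h2
    · -- branch 1: sentence punctuation / double newline; the char is emitted unchanged
      have hnotal : (PySem.Chars.isalnum c || c == ',' || c == ':') = false := by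
        rcases Bool.or_eq_true _ _ |>.mp h1 with h | h
        · rcases Bool.or_eq_true _ _ |>.mp h with h | h
          · rcases Bool.or_eq_true _ _ |>.mp h with h | h
            · rw [beq_iff_eq.mp h]; rfl
            · rw [beq_iff_eq.mp h]; rfl
          · rw [beq_iff_eq.mp h]; rfl
        · rw [beq_iff_eq.mp ((Bool.and_eq_true _ _ |>.mp h).2)]; rfl
      have hemit : pvEmit c cap = c := by
        unfold pvEmit; rw [hnotal, Bool.and_false]; rfl
      rw [hih, hemit]
    · -- branch 2: the flag is absorbed and the char uppercased
      have halnum : (PySem.Chars.isalnum c || c == ',' || c == ':') = true :=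
        (Bool.and_eq_true _ _ |>.mp h2).2
      have hemit : pvEmit c cap = PySem.Chars.upperChar c := by
        unfold pvEmit; rw [h2]; rfl
      rw [upper_ne_nl c halnum, hih, hemit]
    · -- branch 3: plain copy
      have hemit : pvEmit c cap = c := by
        unfold pvEmit
        rw [show (cap && (PySem.Chars.isalnum c || c == ',' || c == ':')) = false from
          by simpa using h2]
        rfl
      rw [hih, hemit]

-- ===== VERDICT (by name: the statement is the Claim_ definition above) =====
theorem auto_capitalize_spec : Claim_equal_auto_capitalize := by
  intro text _
  unfold Spec_auto_capitalize auto_capitalize auto_capitalize_alt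
  rw [pvGoA_eq_zip text.toList [] text.toList false false (by simp)]
  rfl
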